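-- pv_equiv track=rewrite | github.com/Par-zeus/AI_INTERVIEW_ASSITANT | Server/Node/middleware/resumeAnalyzer.py | get_missing_skills_by_role
-- ===== SOURCE A (Python) =====
-- skill_to_role_mapping = {
--     'python': ['Data Scientist', 'Software Engineer'],
--     'java': ['Backend Developer', 'Software Engineer'],
--     'c++': ['Embedded Systems Engineer', 'Game Developer'],
--     'sql': ['Data Analyst', 'Database Administrator'],
--     'javascript': ['Frontend Developer', 'Full Stack Developer'],
--     'html': ['Frontend Developer'],
--     'css': ['Frontend Developer'],
--     'react': ['Frontend Developer'],
--     'node': ['Backend Developer'],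
--     'aws': ['DevOps Engineer', 'Cloud Engineer'],
--     'azure': ['Cloud Engineer'],
--     'gcp': ['Cloud Engineer'],
--     'docker': ['DevOps Engineer'],
--     'kubernetes': ['DevOps Engineer'],
--     'machine learning': ['Data Scientist', 'ML Engineer'],
--     'deep learning': ['AI Engineer'],
--     'tensorflow': ['AI Engineer'],
--     'pytorch': ['AI Engineer'],
--     'nlp': ['NLP Engineer'],
--     'computer vision': ['CV Engineer'],
--     'mongodb': ['Full Stack Developer'],
--     'hadoop': ['Data Engineer'],
--     'typescript': ['Frontend Developer'],
--     'express': ['Backend Developer'],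
--     'figma': ['UI/UX Designer'],
--     'scrum': ['Product Manager'],
--     'agile': ['Product Manager'],
--     'product management': ['Product Manager'],
--     'penetration testing': ['Cybersecurity Analyst'],
--     'network security': ['Cybersecurity Analyst'],
--     'ethical hacking': ['Cybersecurity Analyst'],
--     'encryption': ['Cybersecurity Analyst'],
--     'solidity': ['Blockchain Developer'],
--     'web3': ['Blockchain Developer'],
--     'ethereum': ['Blockchain Developer'],
-- }
--
-- def get_missing_skills_by_role(predicted_role, existing_skills):
--     reverse_map = {}
--     for skill, roles in skill_to_role_mapping.items():
--         for role in roles: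
--             reverse_map.setdefault(role, []).append(skill)
--
--     expected_skills = reverse_map.get(predicted_role, [])
--     missing = [s for s in expected_skills if s not in existing_skills]
--     return list(set(missing))
-- ===== SOURCE B (Python) =====
-- # B: the role->skills table is precomputed once as a literal constant, so each call is
-- # a single dict lookup plus one filtering pass -- no reverse map is ever rebuilt.
-- ROLE_TO_SKILLS = {
--     'Data Scientist': ['python', 'machine learning'],
--     'Software Engineer': ['python', 'java'],
--     'Backend Developer': ['java', 'node', 'express'],
--     'Embedded Systems Engineer': ['c++'],
--     'Game Developer': ['c++'],
--     'Data Analyst': ['sql'],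
--     'Database Administrator': ['sql'],
--     'Frontend Developer': ['javascript', 'html', 'css', 'react', 'typescript'],
--     'Full Stack Developer': ['javascript', 'mongodb'],
--     'DevOps Engineer': ['aws', 'docker', 'kubernetes'],
--     'Cloud Engineer': ['aws', 'azure', 'gcp'],
--     'ML Engineer': ['machine learning'],
--     'AI Engineer': ['deep learning', 'tensorflow', 'pytorch'],
--     'NLP Engineer': ['nlp'],
--     'CV Engineer': ['computer vision'],
--     'Data Engineer': ['hadoop'],
--     'UI/UX Designer': ['figma'],
--     'Product Manager': ['scrum', 'agile', 'product management'],
--     'Cybersecurity Analyst': ['penetration testing', 'network security', 'ethical hacking', 'encryption'],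
--     'Blockchain Developer': ['solidity', 'web3', 'ethereum'],
-- }
--
--
-- def get_missing_skills_by_role(predicted_role, existing_skills):
--     return list({s for s in ROLE_TO_SKILLS.get(predicted_role, [])
--                  if s not in existing_skills})
-- ===== Notes on version B (the rewrite author's own statement) =====
-- stated objective: alternative
-- what changed: B replaces A's per-call construction of a reverse skill-to-role map (nested loops over skill_to_role_mapping) by a literal role->skills table precomputed once at module level, so each call is a single dict lookup followed by one filtering pass wrapped in list(set(...)).
import Mathlib
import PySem

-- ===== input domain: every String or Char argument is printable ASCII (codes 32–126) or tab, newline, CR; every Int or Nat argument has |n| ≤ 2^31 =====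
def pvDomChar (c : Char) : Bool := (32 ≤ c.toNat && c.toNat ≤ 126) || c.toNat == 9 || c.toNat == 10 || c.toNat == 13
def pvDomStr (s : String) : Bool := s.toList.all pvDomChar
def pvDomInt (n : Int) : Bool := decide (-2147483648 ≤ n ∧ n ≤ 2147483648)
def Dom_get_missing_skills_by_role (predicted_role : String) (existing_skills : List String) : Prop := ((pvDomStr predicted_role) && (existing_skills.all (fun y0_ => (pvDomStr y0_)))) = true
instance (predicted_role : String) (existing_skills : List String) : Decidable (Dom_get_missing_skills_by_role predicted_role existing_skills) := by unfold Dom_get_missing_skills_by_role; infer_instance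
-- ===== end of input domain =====

-- B replaces A's per-call reverse-map construction by a precomputed role→skills table
-- (one lookup + one filtering pass per call); same values in the same order.

-- ===== PORT A =====
-- module-level constant skill_to_role_mapping (a dict literal, in source order)
def skillToRoleMapping : List (String × List String) := [
  ("python", ["Data Scientist", "Software Engineer"]),
  ("java", ["Backend Developer", "Software Engineer"]),
  ("c++", ["Embedded Systems Engineer", "Game Developer"]),
  ("sql", ["Data Analyst", "Database Administrator"]),
  ("javascript", ["Frontend Developer", "Full Stack Developer"]),
  ("html", ["Frontend Developer"]),
  ("css", ["Frontend Developer"]),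
  ("react", ["Frontend Developer"]),
  ("node", ["Backend Developer"]),
  ("aws", ["DevOps Engineer", "Cloud Engineer"]),
  ("azure", ["Cloud Engineer"]),
  ("gcp", ["Cloud Engineer"]),
  ("docker", ["DevOps Engineer"]),
  ("kubernetes", ["DevOps Engineer"]),
  ("machine learning", ["Data Scientist", "ML Engineer"]),
  ("deep learning", ["AI Engineer"]),
  ("tensorflow", ["AI Engineer"]),
  ("pytorch", ["AI Engineer"]),
  ("nlp", ["NLP Engineer"]),
  ("computer vision", ["CV Engineer"]),
  ("mongodb", ["Full Stack Developer"]),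
  ("hadoop", ["Data Engineer"]),
  ("typescript", ["Frontend Developer"]),
  ("express", ["Backend Developer"]),
  ("figma", ["UI/UX Designer"]),
  ("scrum", ["Product Manager"]),
  ("agile", ["Product Manager"]),
  ("product management", ["Product Manager"]),
  ("penetration testing", ["Cybersecurity Analyst"]),
  ("network security", ["Cybersecurity Analyst"]),
  ("ethical hacking", ["Cybersecurity Analyst"]),
  ("encryption", ["Cybersecurity Analyst"]),
  ("solidity", ["Blockchain Developer"]),
  ("web3", ["Blockchain Developer"]),
  ("ethereum", ["Blockchain Developer"])]

def get_missing_skills_by_role (predicted_role : String) (existing_skills : List String) : List String :=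
  let reverse_map : PySem.Dict String (List String) :=
    skillToRoleMapping.foldl (fun rm p =>
      p.2.foldl (fun rm role => rm.modify role [] (fun l => l ++ [p.1])) rm) PySem.Dict.empty
  let expected_skills := reverse_map.getD predicted_role []
  let missing := expected_skills.filter (fun s => !(existing_skills.contains s))
  PySem.Set.ofList missing

-- ===== PORT B =====
-- B's module-level constant ROLE_TO_SKILLS (a dict literal, in source order)
def roleToSkills : PySem.Dict String (List String) := PySem.Dict.mk [
  ("Data Scientist", ["python", "machine learning"]),
  ("Software Engineer", ["python", "java"]),
  ("Backend Developer", ["java", "node", "express"]),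
  ("Embedded Systems Engineer", ["c++"]),
  ("Game Developer", ["c++"]),
  ("Data Analyst", ["sql"]),
  ("Database Administrator", ["sql"]),
  ("Frontend Developer", ["javascript", "html", "css", "react", "typescript"]),
  ("Full Stack Developer", ["javascript", "mongodb"]),
  ("DevOps Engineer", ["aws", "docker", "kubernetes"]),
  ("Cloud Engineer", ["aws", "azure", "gcp"]),
  ("ML Engineer", ["machine learning"]),
  ("AI Engineer", ["deep learning", "tensorflow", "pytorch"]),
  ("NLP Engineer", ["nlp"]),
  ("CV Engineer", ["computer vision"]),
  ("Data Engineer", ["hadoop"]),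
  ("UI/UX Designer", ["figma"]),
  ("Product Manager", ["scrum", "agile", "product management"]),
  ("Cybersecurity Analyst", ["penetration testing", "network security", "ethical hacking", "encryption"]),
  ("Blockchain Developer", ["solidity", "web3", "ethereum"])]

def get_missing_skills_by_role_alt (predicted_role : String) (existing_skills : List String) : List String :=
  PySem.Set.ofList ((roleToSkills.getD predicted_role []).filter
    (fun s => !(existing_skills.contains s)))

-- ===== PRECONDITION & SPEC =====
def Spec_get_missing_skills_by_role (predicted_role : String) (existing_skills : List String) (out : List String) : Prop := out = get_missing_skills_by_role_alt predicted_role existing_skills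
instance (predicted_role : String) (existing_skills : List String) (out : List String) : Decidable (Spec_get_missing_skills_by_role predicted_role existing_skills out) := by unfold Spec_get_missing_skills_by_role; infer_instance

-- ===== CLAIM (what is proved, stated in full; the proofs are below) =====
def Claim_equal_get_missing_skills_by_role : Prop := ∀ (predicted_role : String) (existing_skills : List String), Dom_get_missing_skills_by_role predicted_role existing_skills → Spec_get_missing_skills_by_role predicted_role existing_skills (get_missing_skills_by_role predicted_role existing_skills)

-- ===== LEMMAS AND PROOFS =====

-- A's reverse map, built by the foldl over the source mapping, is exactly B's literal table
set_option maxRecDepth 8000 in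
theorem reverse_map_eq :
    skillToRoleMapping.foldl (fun rm p =>
      p.2.foldl (fun rm role => rm.modify role [] (fun l => l ++ [p.1])) rm) PySem.Dict.empty
      = roleToSkills := by decide

-- ===== VERDICT (by name: the statement is the Claim_ definition above) =====
theorem get_missing_skills_by_role_spec : Claim_equal_get_missing_skills_by_role := by
  intro pr ex _
  show get_missing_skills_by_role pr ex = get_missing_skills_by_role_alt pr ex
  simp only [get_missing_skills_by_role, get_missing_skills_by_role_alt, reverse_map_eq]
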